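-- pv_equiv track=rewrite | github.com/doannd1997/graph_cube_gplus | src/graph/lattice.py | find_edges_ikg
-- ===== SOURCE A (Python) =====
-- def exist_path(ci, cg):
--     [il, ir] = ci.split('_')
--     [gl, gr] = cg.split('_')
--     return (int(il, 2) | int(gl, 2) == int(gl, 2)) and (int(ir, 2) | int(gr, 2) == int(gr, 2))
--
-- def join_node(ci, ck):
--     return f'{ci}.{ck}'
--
-- def find_edges_ikg(ci, cg, delta_level=None):
--     if delta_level < 1:
--         return []
--     if delta_level == 1:
--         return [join_node(ci, cg)]
--
--     edges = []
--     for i, g in enumerate(cg):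
--         if g == '1':
--             ck = cg[:i] + '0' + cg[i+1:]
--             if exist_path(ci, ck):
--                 edge = join_node(ck, cg)
--                 edges.append(edge)
--                 edges = edges + find_edges_ikg(ci, ck, delta_level-1)
--
--     return edges
-- ===== SOURCE B (Python) =====
-- def exist_path(ci, cg):
--     [il, ir] = ci.split('_')
--     [gl, gr] = cg.split('_')
--     return (int(il, 2) | int(gl, 2) == int(gl, 2)) and (int(ir, 2) | int(gr, 2) == int(gr, 2))
--
-- def join_node(ci, ck):
--     return f'{ci}.{ck}'
--
-- def find_edges_ikg(ci, cg, delta_level=None):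
--     # iterative pre-order DFS with an explicit work stack instead of recursion
--     if delta_level < 1:
--         return []
--     out = []
--     stack = [(None, cg, delta_level)]  # (edge to emit before this frame, node string, level)
--     while stack:
--         pre, s, level = stack.pop()
--         if pre is not None:
--             out.append(pre)
--         if level <= 1:
--             out.append(join_node(ci, s))
--             continue
--         children = []
--         for i, g in enumerate(s):
--             if g == '1':
--                 ck = s[:i] + '0' + s[i+1:]
--                 if exist_path(ci, ck):
--                     children.append((join_node(ck, s), ck, level - 1))
--         stack.extend(reversed(children))
--     return out
-- ===== Notes on version B (the rewrite author's own statement) =====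
-- stated objective: alternative
-- what changed: The recursive depth-first enumeration is rewritten as an iterative pre-order DFS: a while loop over an explicit stack of (pending-edge, node, level) frames that appends into one shared output list, replacing both the recursion and A's repeated list concatenation (edges = edges + recursive_result).
import Mathlib
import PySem

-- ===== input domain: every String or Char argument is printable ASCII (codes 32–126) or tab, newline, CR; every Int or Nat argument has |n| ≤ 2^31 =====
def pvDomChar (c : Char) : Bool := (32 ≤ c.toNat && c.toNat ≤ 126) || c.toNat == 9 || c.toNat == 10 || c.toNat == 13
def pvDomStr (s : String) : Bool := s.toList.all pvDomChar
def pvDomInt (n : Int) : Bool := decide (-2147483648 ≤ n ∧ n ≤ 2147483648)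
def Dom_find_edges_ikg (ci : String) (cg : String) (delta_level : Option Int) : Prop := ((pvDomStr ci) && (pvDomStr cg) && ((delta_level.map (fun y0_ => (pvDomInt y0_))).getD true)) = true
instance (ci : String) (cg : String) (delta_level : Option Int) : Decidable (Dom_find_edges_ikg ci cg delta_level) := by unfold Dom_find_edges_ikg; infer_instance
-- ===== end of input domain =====

-- B replaces A's recursion by an iterative pre-order DFS over an explicit work stack
-- (alternative decomposition, same cost); return values agree wherever the Python A returns.

-- ===== PORT A =====
-- exist_path(ci, cg) — exact via PySem.Str.split? / PySem.Int.ofStrBase?; the `false` fallbacks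
-- are where Python raises ValueError (unpacking != 2 parts, int() failure), excluded by Pre_.
def exist_path (ci : String) (cg : String) : Bool :=
  match PySem.Str.split? ci "_", PySem.Str.split? cg "_" with
  | some [il, ir], some [gl, gr] =>
    match PySem.Int.ofStrBase? il 2, PySem.Int.ofStrBase? ir 2,
          PySem.Int.ofStrBase? gl 2, PySem.Int.ofStrBase? gr 2 with
    | some a, some b, some c, some d =>
      (PySem.Int.bor a c == c) && (PySem.Int.bor b d == d)
    | _, _, _, _ => false
  | _, _ => false

def join_node (ci : String) (ck : String) : String := ci ++ "." ++ ck

-- ck = cg[:i] + '0' + cg[i+1:] (this expression appears verbatim in both Pythons)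
def flipAt (cs : List Char) (i : Int) : String :=
  String.ofList (PySem.List.slice cs none (some i) ++ ['0'] ++ PySem.List.slice cs (some (i + 1)) none)

-- the recursive body of A (delta_level already unpacked to an Int)
def find_edges_ikg_rec (ci : String) (cg : String) (n : Int) : List String :=
  if _h1 : n < 1 then []
  else if _h2 : n = 1 then [join_node ci cg]
  else
    (PySem.List.enumerate cg.toList).foldl
      (fun edges p =>
        if p.2 = '1' then
          if exist_path ci (flipAt cg.toList p.1) then
            (edges ++ [join_node (flipAt cg.toList p.1) cg])
              ++ find_edges_ikg_rec ci (flipAt cg.toList p.1) (n - 1)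
          else edges
        else edges) []
termination_by n.toNat
decreasing_by simp_wf; omega

def find_edges_ikg (ci : String) (cg : String) (delta_level : Option Int) : List String :=
  match delta_level with
  | none => []  -- Python: `None < 1` raises TypeError; excluded by Pre_
  | some n => find_edges_ikg_rec ci cg n

-- ===== PORT B =====
-- `if pre is not None: out.append(pre)`
def pushPre (out : List String) (pre : Option String) : List String :=
  match pre with | some e => out ++ [e] | none => out

-- weight of a stack frame, used only as runB's termination measure
def pvWt (f : Option String × String × Int) : Nat := (f.2.1.toList.length + 2) ^ f.2.2.toNat

theorem pvFlipAt_len (cs : List Char) (i : Int) (h0 : 0 ≤ i) (h1 : i.toNat < cs.length) :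
    (flipAt cs i).toList.length = cs.length := by
  unfold flipAt
  rw [PySem.List.slice_to cs h0, PySem.List.slice_from cs (by omega : (0:Int) ≤ i + 1)]
  simp
  omega

-- sum bound on the children built by runB's inner fold (cited by runB's decreasing_by)
theorem pvChildrenSum (ci : String) (s : String) (lvl : Int)
    (pairs : List (Int × Char)) (acc : List (Option String × String × Int))
    (hp : ∀ p ∈ pairs, 0 ≤ p.1 ∧ p.1.toNat < s.toList.length) :
    ((pairs.foldl
        (fun acc p =>
          if p.2 = '1' then
            if exist_path ci (flipAt s.toList p.1) then
              acc ++ [(some (join_node (flipAt s.toList p.1) s), flipAt s.toList p.1, lvl - 1)]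
            else acc
          else acc) acc).map pvWt).sum
      ≤ ((acc.map pvWt).sum) + pairs.length * (s.toList.length + 2) ^ (lvl - 1).toNat := by
  induction pairs generalizing acc with
  | nil => simp
  | cons p ps ih =>
    have hb := hp p (by simp)
    have hps : ∀ q ∈ ps, 0 ≤ q.1 ∧ q.1.toNat < s.toList.length := fun q hq => hp q (by simp [hq])
    simp only [List.foldl_cons]
    refine le_trans (ih _ hps) ?_
    have hw : pvWt (some (join_node (flipAt s.toList p.1) s), flipAt s.toList p.1, lvl - 1)
        = (s.toList.length + 2) ^ (lvl - 1).toNat := by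
      show ((flipAt s.toList p.1).toList.length + 2) ^ (lvl - 1).toNat = _
      rw [pvFlipAt_len s.toList p.1 hb.1 hb.2]
    split_ifs with hc1 hc2
    · rw [List.map_append, List.sum_append]
      simp only [List.map_cons, List.map_nil, List.sum_cons, List.sum_nil]
      rw [hw, List.length_cons, Nat.succ_mul]
      omega
    · rw [List.length_cons, Nat.succ_mul]; omega
    · rw [List.length_cons, Nat.succ_mul]; omega

def runB (ci : String) (stack : List (Option String × String × Int)) (out : List String) :
    List String :=
  match stack with
  | [] => out
  | (pre, s, lvl) :: rest =>
    if _hgt : lvl ≤ 1 then runB ci rest (pushPre out pre ++ [join_node ci s])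
    else
      runB ci
        (((PySem.List.enumerate s.toList).foldl
          (fun acc p =>
            if p.2 = '1' then
              if exist_path ci (flipAt s.toList p.1) then
                acc ++ [(some (join_node (flipAt s.toList p.1) s), flipAt s.toList p.1, lvl - 1)]
              else acc
            else acc) []) ++ rest)
        (pushPre out pre)
termination_by (stack.map pvWt).sum
decreasing_by
  · have hpos : 0 < pvWt (pre, s, lvl) := by
      show 0 < (s.toList.length + 2) ^ lvl.toNat
      positivity
    simp only [List.map_cons, List.sum_cons]
    omega
  · have hp : ∀ p ∈ PySem.List.enumerate s.toList, 0 ≤ p.1 ∧ p.1.toNat < s.toList.length := by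
      intro p hmem
      rw [PySem.List.mem_enumerate_iff] at hmem
      obtain ⟨k, hk, rfl⟩ := hmem
      constructor
      · show (0:Int) ≤ 0 + (k:Int); omega
      · show ((0:Int) + (k:Int)).toNat < s.toList.length; omega
    have hsum := pvChildrenSum ci s lvl (PySem.List.enumerate s.toList) [] hp
    simp only [List.map_nil, List.sum_nil, Nat.zero_add, PySem.List.length_enumerate] at hsum
    have hwt : pvWt (pre, s, lvl) = (s.toList.length + 2) ^ lvl.toNat := rfl
    have hW : 0 < (s.toList.length + 2) ^ (lvl - 1).toNat := by positivity
    have hpow : (s.toList.length + 2) ^ lvl.toNat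
        = (s.toList.length + 2) ^ (lvl - 1).toNat * (s.toList.length + 2) := by
      rw [← pow_succ]; congr 1; omega
    have hlt : s.toList.length * (s.toList.length + 2) ^ (lvl - 1).toNat
        < (s.toList.length + 2) ^ lvl.toNat := by
      rw [hpow]; nlinarith
    simp only [List.map_cons, List.sum_cons, List.map_append, List.sum_append, dite_eq_ite]
    omega

def find_edges_ikg_alt (ci : String) (cg : String) (delta_level : Option Int) : List String :=
  match delta_level with
  | none => []  -- Python: `None < 1` raises TypeError; excluded by Pre_
  | some n => if n < 1 then [] else runB ci [(none, cg, n)] []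

-- ===== PRECONDITION & SPEC =====
-- pvParses s = both '_'-separated halves of s are int(·, 2)-parseable (exactly one '_')
def pvParses (s : String) : Bool :=
  match PySem.Str.split? s "_" with
  | some [l, r] => (PySem.Int.ofStrBase? l 2).isSome && (PySem.Int.ofStrBase? r 2).isSome
  | _ => false

-- Pre_ excludes exactly the inputs where the Python A raises: delta_level=None (TypeError on
-- `None < 1`), and delta_level ≥ 2 with a '1' in cg while ci or cg is not of the form
-- <int(·,2)-parseable>_<parseable> (ValueError in exist_path / on unpacking the split).
def Pre_find_edges_ikg (ci : String) (cg : String) (delta_level : Option Int) : Prop :=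
  delta_level.isSome = true ∧
    (2 ≤ delta_level.getD 0 → '1' ∈ cg.toList → pvParses ci = true ∧ pvParses cg = true)
instance (ci : String) (cg : String) (delta_level : Option Int) :
    Decidable (Pre_find_edges_ikg ci cg delta_level) := by unfold Pre_find_edges_ikg; infer_instance

def pvWitness_find_edges_ikg : String × String × Option Int := ("0_0", "1_1", some 2)

def Spec_find_edges_ikg (ci : String) (cg : String) (delta_level : Option Int) (out : List String) : Prop := out = find_edges_ikg_alt ci cg delta_level
instance (ci : String) (cg : String) (delta_level : Option Int) (out : List String) : Decidable (Spec_find_edges_ikg ci cg delta_level out) := by unfold Spec_find_edges_ikg; infer_instance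

-- ===== CLAIM (what is proved, stated in full; the proofs are below) =====
def Claim_equal_find_edges_ikg : Prop := ∀ (ci : String) (cg : String) (delta_level : Option Int), Dom_find_edges_ikg ci cg delta_level → Pre_find_edges_ikg ci cg delta_level → Spec_find_edges_ikg ci cg delta_level (find_edges_ikg ci cg delta_level)

-- ===== LEMMAS AND PROOFS =====

-- per-index contribution of A's loop body / of runB's child collection
def pvGA (ci : String) (cg : String) (n : Int) (p : Int × Char) : List String :=
  if p.2 = '1' then
    if exist_path ci (flipAt cg.toList p.1) then
      [join_node (flipAt cg.toList p.1) cg] ++ find_edges_ikg_rec ci (flipAt cg.toList p.1) (n - 1)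
    else []
  else []

def pvGB (ci : String) (s : String) (lvl : Int) (p : Int × Char) :
    List (Option String × String × Int) :=
  if p.2 = '1' then
    if exist_path ci (flipAt s.toList p.1) then
      [(some (join_node (flipAt s.toList p.1) s), flipAt s.toList p.1, lvl - 1)]
    else []
  else []

theorem pvFoldA (ci : String) (cg : String) (n : Int) (pairs : List (Int × Char)) :
    ∀ acc : List String,
      pairs.foldl
        (fun edges p =>
          if p.2 = '1' then
            if exist_path ci (flipAt cg.toList p.1) then
              (edges ++ [join_node (flipAt cg.toList p.1) cg])
                ++ find_edges_ikg_rec ci (flipAt cg.toList p.1) (n - 1)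
            else edges
          else edges) acc
      = acc ++ pairs.flatMap (pvGA ci cg n) := by
  induction pairs with
  | nil => simp
  | cons p ps ih =>
    intro acc
    simp only [List.foldl_cons, List.flatMap_cons]
    rw [ih]
    unfold pvGA
    split_ifs <;> simp [*]

theorem pvFoldB (ci : String) (s : String) (lvl : Int) (pairs : List (Int × Char)) :
    ∀ acc : List (Option String × String × Int),
      pairs.foldl
        (fun acc p =>
          if p.2 = '1' then
            if exist_path ci (flipAt s.toList p.1) then
              acc ++ [(some (join_node (flipAt s.toList p.1) s), flipAt s.toList p.1, lvl - 1)]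
            else acc
          else acc) acc
      = acc ++ pairs.flatMap (pvGB ci s lvl) := by
  induction pairs with
  | nil => simp
  | cons p ps ih =>
    intro acc
    simp only [List.foldl_cons, List.flatMap_cons]
    rw [ih]
    unfold pvGB
    split_ifs <;> simp [*]

-- MAIN INVARIANT: processing one frame appends its pending edge, then exactly A's recursive output
theorem pvMain (ci : String) :
    ∀ (l : Nat) (n : Int), n.toNat = l → 1 ≤ n →
      ∀ (pre : Option String) (s : String) (rest : List (Option String × String × Int))
        (out : List String),
        runB ci ((pre, s, n) :: rest) out
          = runB ci rest (pushPre out pre ++ find_edges_ikg_rec ci s n) := by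
  intro l
  induction l using Nat.strong_induction_on with
  | _ l IH =>
    intro n hn h1 pre s rest out
    simp only [runB]
    by_cases hle : n ≤ 1
    · have hn1 : n = 1 := le_antisymm hle h1
      subst hn1
      rw [dif_pos (le_refl (1 : Int))]
      have hbase : find_edges_ikg_rec ci s 1 = [join_node ci s] := by
        rw [find_edges_ikg_rec]
        norm_num
      rw [hbase]
    · rw [dif_neg hle]
      rw [pvFoldB]
      have hrec : find_edges_ikg_rec ci s n
          = (PySem.List.enumerate s.toList).flatMap (pvGA ci s n) := by
        rw [find_edges_ikg_rec]
        rw [dif_neg (by omega : ¬ n < 1), dif_neg (by omega : ¬ n = 1)]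
        rw [pvFoldA]
        simp
      rw [hrec]
      simp only [List.nil_append]
      have inner : ∀ (pairs : List (Int × Char)) (rest' : List (Option String × String × Int))
          (out' : List String),
          runB ci (pairs.flatMap (pvGB ci s n) ++ rest') out'
            = runB ci rest' (out' ++ pairs.flatMap (pvGA ci s n)) := by
        intro pairs
        induction pairs with
        | nil => intro rest' out'; simp
        | cons p ps ihp =>
          intro rest' out'
          by_cases hc1 : p.2 = '1'
          · by_cases hc2 : exist_path ci (flipAt s.toList p.1) = true
            · have hb : pvGB ci s n p
                  = [(some (join_node (flipAt s.toList p.1) s), flipAt s.toList p.1, n - 1)] := by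
                simp [pvGB, hc1, hc2]
              have ha : pvGA ci s n p
                  = [join_node (flipAt s.toList p.1) s]
                      ++ find_edges_ikg_rec ci (flipAt s.toList p.1) (n - 1) := by
                simp [pvGA, hc1, hc2]
              rw [List.flatMap_cons, List.flatMap_cons, hb, ha]
              simp only [List.cons_append, List.nil_append]
              rw [IH ((n - 1).toNat) (by omega) (n - 1) rfl (by omega)]
              rw [ihp]
              simp [pushPre, List.append_assoc]
            · have hb : pvGB ci s n p = [] := by simp [pvGB, hc1, hc2]
              have ha : pvGA ci s n p = [] := by simp [pvGA, hc1, hc2]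
              rw [List.flatMap_cons, List.flatMap_cons, hb, ha]
              simp only [List.nil_append]
              exact ihp rest' out'
          · have hb : pvGB ci s n p = [] := by simp [pvGB, hc1]
            have ha : pvGA ci s n p = [] := by simp [pvGA, hc1]
            rw [List.flatMap_cons, List.flatMap_cons, hb, ha]
            simp only [List.nil_append]
            exact ihp rest' out'
      exact inner (PySem.List.enumerate s.toList) rest _

-- ===== VERDICT (by name: the statement is the Claim_ definition above) =====
theorem find_edges_ikg_spec : Claim_equal_find_edges_ikg := by
  intro ci cg dl _hDom hPre
  unfold Spec_find_edges_ikg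
  obtain ⟨hsome, -⟩ := hPre
  obtain ⟨n, rfl⟩ := Option.isSome_iff_exists.mp hsome
  have hA : find_edges_ikg ci cg (some n) = find_edges_ikg_rec ci cg n := rfl
  have hB : find_edges_ikg_alt ci cg (some n)
      = if n < 1 then [] else runB ci [(none, cg, n)] [] := rfl
  rw [hA, hB]
  by_cases hlt : n < 1
  · rw [if_pos hlt, find_edges_ikg_rec, dif_pos hlt]
  · rw [if_neg hlt]
    rw [pvMain ci n.toNat n rfl (by omega)]
    simp [runB, pushPre]
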